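-- pv_equiv track=rewrite | github.com/K123AsJ0k1/multi-cloud-hpc-oss-mlops-platform | applications/integration/submitter/backend/functions/utility/storage/files.py | check_secrets
-- ===== SOURCE A (Python) =====
-- def check_secrets(
--     secrets: any
-- ) -> bool:
--     valid_prefixes = [
--         'CLOUD',
--         'STORAGE',
--         'HPC',
--         'INTEGRATION'
--     ]
--
--     prefix_separations = [
--         0,
--         0,
--         0,
--         0
--     ]
--
--     for key, value in secrets.items():
--         key_split = key.split('_')
--         if not key_split[0] in valid_prefixes:
--             # Put logging
--             return False
--         case = 0
--         for prefix in valid_prefixes: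
--             if prefix == key_split[0]:
--                 value_separations = value.split('|')
--                 if prefix_separations[case] == 0:
--                     prefix_separations[case] = len(value_separations)
--                     break
--                 if not len(value_separations) == prefix_separations[case]:
--                     # Put logging
--                     return False
--             case += 1
--     return True
-- ===== SOURCE B (Python) =====
-- def check_secrets(
--     secrets: any
-- ) -> bool:
--     valid_prefixes = ['CLOUD', 'STORAGE', 'HPC', 'INTEGRATION']
--     groups = {}
--     for key, value in secrets.items():
--         prefix = key.split('_')[0]
--         if prefix not in valid_prefixes:
--             return False
--         groups.setdefault(prefix, set()).add(len(value.split('|')))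
--     return all(len(counts) <= 1 for counts in groups.values())
-- ===== Notes on version B (the rewrite author's own statement) =====
-- stated objective: simpler
-- what changed: Replaces the position-indexed parallel counts array and the inner linear scan over valid_prefixes with a grouping dict mapping each prefix to the set of its value-separation counts, built in one pass and checked for singleton groups in a final pass.
import Mathlib
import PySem

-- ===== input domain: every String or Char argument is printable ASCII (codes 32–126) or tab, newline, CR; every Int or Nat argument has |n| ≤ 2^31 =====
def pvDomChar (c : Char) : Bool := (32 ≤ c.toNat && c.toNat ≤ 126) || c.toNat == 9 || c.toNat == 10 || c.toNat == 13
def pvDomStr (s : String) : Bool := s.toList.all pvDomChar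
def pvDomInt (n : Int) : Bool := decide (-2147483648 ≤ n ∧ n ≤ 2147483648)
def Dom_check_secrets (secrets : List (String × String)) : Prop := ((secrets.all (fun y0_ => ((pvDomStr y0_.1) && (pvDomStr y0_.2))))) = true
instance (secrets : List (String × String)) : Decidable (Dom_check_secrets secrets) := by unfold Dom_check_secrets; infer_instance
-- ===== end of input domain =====

-- B replaces A's parallel counts array + inner prefix scan by a grouping dict of count-sets
-- checked for singleton groups in a final pass (objective: simpler); return values agree everywhere.

-- shared helper: s.split(sep) for a non-empty literal sep (the default branch never fires there)
def pvSplit (s sep : String) : List String := (PySem.Str.split? s sep).getD []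

-- the valid_prefixes list both Pythons write as a literal
def pvValid : List String := ["CLOUD", "STORAGE", "HPC", "INTEGRATION"]

-- ===== PORT A =====
-- inner 'for prefix in valid_prefixes' loop: some ps' = fall through / break, none = 'return False'
def pvA_inner (keyHead value : String) (prefixes : List String) (caseIdx : Nat) (ps : List Int) : Option (List Int) :=
  match prefixes with
  | [] => some ps
  | p :: rest =>
    if p == keyHead then
      let n : Int := ((pvSplit value "|").length : Int)
      if ps.getD caseIdx 0 == 0 then
        some (ps.set caseIdx n)
      else if !(n == ps.getD caseIdx 0) then
        none
      else
        pvA_inner keyHead value rest (caseIdx + 1) ps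
    else
      pvA_inner keyHead value rest (caseIdx + 1) ps

def pvA_loop (items : List (String × String)) (ps : List Int) : Bool :=
  match items with
  | [] => true
  | (key, value) :: rest =>
    -- key.split('_')[0]: split never returns an empty list, so index 0 never raises
    let keyHead := PySem.List.pyGetD (pvSplit key "_") 0 ""
    if !(pvValid.contains keyHead) then
      false
    else
      match pvA_inner keyHead value pvValid 0 ps with
      | none => false
      | some ps' => pvA_loop rest ps'

def check_secrets (secrets : List (String × String)) : Bool :=
  pvA_loop secrets [0, 0, 0, 0]

-- ===== PORT B =====
-- grouping pass: groups.setdefault(prefix, set()).add(len(value.split('|'))); none = 'return False'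
def pvB_group (items : List (String × String)) (groups : PySem.Dict String (PySem.Set Int)) :
    Option (PySem.Dict String (PySem.Set Int)) :=
  match items with
  | [] => some groups
  | (key, value) :: rest =>
    let pfx := PySem.List.pyGetD (pvSplit key "_") 0 ""
    if pvValid.contains pfx then
      pvB_group rest
        (groups.modify pfx PySem.Set.empty
          (fun s => PySem.Set.add s ((pvSplit value "|").length : Int)))
    else
      none

def check_secrets_alt (secrets : List (String × String)) : Bool :=
  match pvB_group secrets PySem.Dict.empty with
  | none => false
  | some groups => groups.values.all (fun counts => decide (PySem.Set.len counts ≤ 1))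

-- ===== PRECONDITION & SPEC =====
def Spec_check_secrets (secrets : List (String × String)) (out : Bool) : Prop := out = check_secrets_alt secrets
instance (secrets : List (String × String)) (out : Bool) : Decidable (Spec_check_secrets secrets out) := by unfold Spec_check_secrets; infer_instance

-- ===== CLAIM (what is proved, stated in full; the proofs are below) =====
def Claim_equal_check_secrets : Prop := ∀ (secrets : List (String × String)), Dom_check_secrets secrets → Spec_check_secrets secrets (check_secrets secrets)

-- ===== LEMMAS AND PROOFS =====

-- B's run from an arbitrary intermediate dict (proof helper)
def pvB_run (items : List (String × String)) (g : PySem.Dict String (PySem.Set Int)) : Bool :=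
  match pvB_group items g with
  | none => false
  | some groups => groups.values.all (fun counts => decide (PySem.Set.len counts ≤ 1))

lemma pvB_run_cons (key value : String) (rest : List (String × String))
    (g : PySem.Dict String (PySem.Set Int)) :
    pvB_run ((key, value) :: rest) g =
      (if pvValid.contains (PySem.List.pyGetD (pvSplit key "_") 0 "") then
        pvB_run rest
          (g.modify (PySem.List.pyGetD (pvSplit key "_") 0 "") PySem.Set.empty
            (fun s => PySem.Set.add s ((pvSplit value "|").length : Int)))
      else false) := by
  simp only [pvB_run, pvB_group]
  split_ifs with h <;> rfl

-- relation between one cell of A's counts array and B's group for the matching prefix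
def pvRel (n : Int) (g : PySem.Dict String (PySem.Set Int)) (k : String) : Prop :=
  if n = 0 then g.contains k = false
  else g.contains k = true ∧ g.getD k PySem.Set.empty = [n]

def pvInv (ps : List Int) (g : PySem.Dict String (PySem.Set Int)) : Prop :=
  g.keys.Nodup ∧ (∀ k ∈ g.keys, k ∈ pvValid) ∧
  ∃ a b c d : Int, ps = [a, b, c, d] ∧
    pvRel a g "CLOUD" ∧ pvRel b g "STORAGE" ∧ pvRel c g "HPC" ∧ pvRel d g "INTEGRATION"

lemma pvRel_modify_ne {m : Int} {g : PySem.Dict String (PySem.Set Int)} {k pfx : String}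
    {f : PySem.Set Int → PySem.Set Int} (hne : k ≠ pfx) (h : pvRel m g k) :
    pvRel m (g.modify pfx PySem.Set.empty f) k := by
  unfold pvRel at h ⊢
  split_ifs at h ⊢ with hm
  · rw [PySem.Dict.contains_modify]
    simp [hne, h]
  · obtain ⟨hc, hd⟩ := h
    refine ⟨?_, ?_⟩
    · rw [PySem.Dict.contains_modify]
      simp [hc]
    · rw [PySem.Dict.getD_modify, if_neg hne]
      exact hd

lemma pvSplitOn_go_ne_nil (sep : List Char) :
    ∀ (fuel : Nat) (l cur : List Char) (acc : List (List Char)),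
      PySem.Chars.splitOn.go sep fuel l cur acc ≠ [] := by
  intro fuel
  induction fuel with
  | zero => intro l cur acc; simp [PySem.Chars.splitOn.go]
  | succ fuel ih =>
    intro l cur acc
    cases l with
    | nil => simp [PySem.Chars.splitOn.go]
    | cons c rest =>
      rw [PySem.Chars.splitOn.go]
      split <;> apply ih

lemma pvSplit_ne_nil (s sep : String) (h : sep.toList ≠ []) : pvSplit s sep ≠ [] := by
  simp only [pvSplit, PySem.Str.split?, PySem.Chars.split?, PySem.Chars.splitOn,
    List.isEmpty_eq_false_iff.mpr h]
  simp [pvSplitOn_go_ne_nil]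

lemma pvN_ne_zero (value : String) : ((pvSplit value "|").length : Int) ≠ 0 := by
  have h := pvSplit_ne_nil value "|" (by decide)
  simpa using h

-- length never shrinks under Set.add
lemma pvSet_add_len_ge {s : PySem.Set Int} {n : Int} : s.length ≤ (PySem.Set.add s n).length := by
  simp only [PySem.Set.add]
  split
  · exact le_refl _
  · simp

-- once some group has ≥ 2 distinct counts, B's final verdict is false
lemma pvB_bad (items : List (String × String)) :
    ∀ (g : PySem.Dict String (PySem.Set Int)) (k : String),
      g.contains k = true → 2 ≤ (g.getD k PySem.Set.empty).length → pvB_run items g = false := by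
  induction items with
  | nil =>
    intro g k hc hlen
    have hsome : (g.get? k).isSome := by rw [← PySem.Dict.contains_eq_isSome_get?]; exact hc
    obtain ⟨v, hv⟩ := Option.isSome_iff_exists.mp hsome
    have hgd : g.getD k PySem.Set.empty = v := by
      rw [PySem.Dict.getD_eq_get?_getD, hv]; rfl
    have hmem : v ∈ g.values :=
      List.mem_map_of_mem (PySem.Dict.mem_items_of_get?_eq_some g hv)
    simp only [pvB_run, pvB_group]
    rw [List.all_eq_false]
    refine ⟨v, hmem, ?_⟩
    rw [hgd] at hlen
    simp only [PySem.Set.len, decide_eq_true_eq]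
    omega
  | cons p rest ih =>
    intro g k hc hlen
    obtain ⟨key, value⟩ := p
    rw [pvB_run_cons]
    split
    · refine ih _ k ?_ ?_
      · rw [PySem.Dict.contains_modify]
        simp [hc]
      · rw [PySem.Dict.getD_modify]
        split
        · next heq =>
          rw [heq] at hlen
          exact le_trans hlen pvSet_add_len_ge
        · exact hlen
    · rfl

-- A's inner loop, computed for each of the four literal prefixes
lemma pvA_inner_CLOUD (value : String) (a b c d : Int) :
    pvA_inner "CLOUD" value pvValid 0 [a, b, c, d] =
      (if a = 0 then some [((pvSplit value "|").length : Int), b, c, d]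
       else if ((pvSplit value "|").length : Int) ≠ a then none else some [a, b, c, d]) := by
  have h1 : (("CLOUD" : String) == "CLOUD") = true := by decide
  simp only [pvValid, pvA_inner, h1, if_true,
    List.getD_cons_zero, List.getD_cons_succ, List.set]
  by_cases ha : a = 0
  · simp [ha]
  · simp [ha, beq_iff_eq]

lemma pvA_inner_STORAGE (value : String) (a b c d : Int) :
    pvA_inner "STORAGE" value pvValid 0 [a, b, c, d] =
      (if b = 0 then some [a, ((pvSplit value "|").length : Int), c, d]
       else if ((pvSplit value "|").length : Int) ≠ b then none else some [a, b, c, d]) := by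
  have h1 : (("CLOUD" : String) == "STORAGE") = false := by decide
  have h2 : (("STORAGE" : String) == "STORAGE") = true := by decide
  simp only [pvValid, pvA_inner, h1, h2, if_true, Bool.false_eq_true, if_false,
    List.getD_cons_zero, List.getD_cons_succ, List.set]
  by_cases hb : b = 0
  · simp [hb]
  · simp [hb, beq_iff_eq]

lemma pvA_inner_HPC (value : String) (a b c d : Int) :
    pvA_inner "HPC" value pvValid 0 [a, b, c, d] =
      (if c = 0 then some [a, b, ((pvSplit value "|").length : Int), d]
       else if ((pvSplit value "|").length : Int) ≠ c then none else some [a, b, c, d]) := by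
  have h1 : (("CLOUD" : String) == "HPC") = false := by decide
  have h2 : (("STORAGE" : String) == "HPC") = false := by decide
  have h3 : (("HPC" : String) == "HPC") = true := by decide
  simp only [pvValid, pvA_inner, h1, h2, h3, if_true, Bool.false_eq_true, if_false,
    List.getD_cons_zero, List.getD_cons_succ, List.set]
  by_cases hcc : c = 0
  · simp [hcc]
  · simp [hcc, beq_iff_eq]

lemma pvA_inner_INTEGRATION (value : String) (a b c d : Int) :
    pvA_inner "INTEGRATION" value pvValid 0 [a, b, c, d] =
      (if d = 0 then some [a, b, c, ((pvSplit value "|").length : Int)]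
       else if ((pvSplit value "|").length : Int) ≠ d then none else some [a, b, c, d]) := by
  have h1 : (("CLOUD" : String) == "INTEGRATION") = false := by decide
  have h2 : (("STORAGE" : String) == "INTEGRATION") = false := by decide
  have h3 : (("HPC" : String) == "INTEGRATION") = false := by decide
  have h4 : (("INTEGRATION" : String) == "INTEGRATION") = true := by decide
  simp only [pvValid, pvA_inner, h1, h2, h3, h4, if_true, Bool.false_eq_true, if_false,
    List.getD_cons_zero, List.getD_cons_succ, List.set]
  by_cases hd : d = 0
  · simp [hd]
  · simp [hd, beq_iff_eq]

lemma pvMain (items : List (String × String)) :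
    ∀ (ps : List Int) (g : PySem.Dict String (PySem.Set Int)),
      pvInv ps g → pvA_loop items ps = pvB_run items g := by
  induction items with
  | nil =>
    rintro ps g ⟨hnd, hsub, a, b, c, d, rfl, rCl, rSt, rHp, rIn⟩
    simp only [pvA_loop, pvB_run, pvB_group]
    rw [PySem.Dict.values_eq_map_keys g hnd PySem.Set.empty, List.all_map]
    symm
    rw [List.all_eq_true]
    intro k hk
    have hc : g.contains k = true := by
      rw [PySem.Dict.contains_iff_mem_keys]; exact hk
    have hone : g.getD k PySem.Set.empty = [0] ∨ ∃ m : Int, g.getD k PySem.Set.empty = [m] := by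
      have hkv := hsub k hk
      simp only [pvValid, List.mem_cons, List.not_mem_nil, or_false] at hkv
      rcases hkv with rfl | rfl | rfl | rfl
      · unfold pvRel at rCl
        split_ifs at rCl with h
        · rw [rCl] at hc; cases hc
        · exact Or.inr ⟨a, rCl.2⟩
      · unfold pvRel at rSt
        split_ifs at rSt with h
        · rw [rSt] at hc; cases hc
        · exact Or.inr ⟨b, rSt.2⟩
      · unfold pvRel at rHp
        split_ifs at rHp with h
        · rw [rHp] at hc; cases hc
        · exact Or.inr ⟨c, rHp.2⟩
      · unfold pvRel at rIn
        split_ifs at rIn with h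
        · rw [rIn] at hc; cases hc
        · exact Or.inr ⟨d, rIn.2⟩
    rcases hone with h | ⟨m, h⟩ <;>
      · have h' : g.getD k [] = _ := h
        simp [Function.comp, h', PySem.Set.len]
  | cons p rest ih =>
    rintro ps g ⟨hnd, hsub, a, b, c, d, rfl, rCl, rSt, rHp, rIn⟩
    obtain ⟨key, value⟩ := p
    rw [pvB_run_cons]
    by_cases hmem : pvValid.contains (PySem.List.pyGetD (pvSplit key "_") 0 "") = true
    · rw [if_pos hmem]
      simp only [pvA_loop, hmem, Bool.not_true, Bool.false_eq_true, if_false]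
      obtain ⟨pfx, hpfx⟩ : ∃ x : String, x = PySem.List.pyGetD (pvSplit key "_") 0 "" :=
        ⟨_, rfl⟩
      rw [← hpfx] at hmem ⊢
      set n : Int := ((pvSplit value "|").length : Int) with hn
      have hinv : ∀ (ps' : List Int),
          pvInv ps' (g.modify pfx PySem.Set.empty (fun s => PySem.Set.add s n)) →
          pvA_loop rest ps' =
            pvB_run rest (g.modify pfx PySem.Set.empty (fun s => PySem.Set.add s n)) := fun ps' =>
        ih ps' _
      have hnd' : (g.modify pfx PySem.Set.empty (fun s => PySem.Set.add s n)).keys.Nodup := by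
        rw [PySem.Dict.keys_modify]
        exact PySem.Dict.nodup_keys_insert g _ _ hnd
      have hsub' : ∀ k ∈ (g.modify pfx PySem.Set.empty (fun s => PySem.Set.add s n)).keys,
          k ∈ pvValid := by
        intro k hk
        rw [PySem.Dict.keys_modify] at hk
        rw [PySem.Dict.mem_keys_insert] at hk
        rcases hk with rfl | hk'
        · exact List.contains_iff_mem.mp hmem
        · exact hsub k hk'
      have hmem' := List.contains_iff_mem.mp hmem
      simp only [pvValid, List.mem_cons, List.not_mem_nil, or_false] at hmem'
      have hbad : ∀ (old : Int), g.contains pfx = true →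
          g.getD pfx PySem.Set.empty = [old] → n ≠ old →
          pvB_run rest (g.modify pfx PySem.Set.empty (fun s => PySem.Set.add s n)) = false := by
        intro old hco hgo hne
        refine pvB_bad rest _ pfx ?_ ?_
        · rw [PySem.Dict.contains_modify]; simp
        · rw [PySem.Dict.getD_modify, if_pos rfl, hgo]
          have : PySem.Set.add [old] n = [old, n] := by
            simp [PySem.Set.add, List.contains_eq_mem, hne]
          rw [this]
          simp
      have hkeep : ∀ (old : Int), g.getD pfx PySem.Set.empty = [old] → n = old →
          (g.modify pfx PySem.Set.empty (fun s => PySem.Set.add s n)).contains pfx = true ∧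
          (g.modify pfx PySem.Set.empty (fun s => PySem.Set.add s n)).getD pfx PySem.Set.empty
            = [old] := by
        intro old hgo hne
        constructor
        · rw [PySem.Dict.contains_modify]; simp
        · rw [PySem.Dict.getD_modify, if_pos rfl, hgo]
          subst hne
          simp [PySem.Set.add, List.contains_eq_mem]
      have hfresh : g.contains pfx = false →
          (g.modify pfx PySem.Set.empty (fun s => PySem.Set.add s n)).contains pfx = true ∧
          (g.modify pfx PySem.Set.empty (fun s => PySem.Set.add s n)).getD pfx PySem.Set.empty
            = [n] := by
        intro hco
        constructor
        · rw [PySem.Dict.contains_modify]; simp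
        · rw [PySem.Dict.getD_modify, if_pos rfl,
            PySem.Dict.getD_of_not_contains g PySem.Set.empty hco]
          simp [PySem.Set.add, PySem.Set.empty]
      rcases hmem' with rfl | rfl | rfl | rfl
      · -- pfx = "CLOUD"
        rw [pvA_inner_CLOUD]
        unfold pvRel at rCl
        split_ifs at rCl with ha
        · rw [if_pos ha]
          refine hinv _ ⟨hnd', hsub', n, b, c, d, rfl, ?_, ?_, ?_, ?_⟩
          · unfold pvRel; rw [if_neg (pvN_ne_zero value)]; exact hfresh rCl
          · exact pvRel_modify_ne (by decide) rSt
          · exact pvRel_modify_ne (by decide) rHp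
          · exact pvRel_modify_ne (by decide) rIn
        · rw [if_neg ha]
          by_cases hne : n = a
          · rw [if_neg (by simpa using hne)]
            refine hinv _ ⟨hnd', hsub', a, b, c, d, rfl, ?_, ?_, ?_, ?_⟩
            · unfold pvRel; rw [if_neg ha]; exact hkeep a rCl.2 hne
            · exact pvRel_modify_ne (by decide) rSt
            · exact pvRel_modify_ne (by decide) rHp
            · exact pvRel_modify_ne (by decide) rIn
          · rw [if_pos hne]
            exact (hbad a rCl.1 rCl.2 hne).symm
      · -- pfx = "STORAGE"
        rw [pvA_inner_STORAGE]
        unfold pvRel at rSt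
        split_ifs at rSt with hb
        · rw [if_pos hb]
          refine hinv _ ⟨hnd', hsub', a, n, c, d, rfl, ?_, ?_, ?_, ?_⟩
          · exact pvRel_modify_ne (by decide) rCl
          · unfold pvRel; rw [if_neg (pvN_ne_zero value)]; exact hfresh rSt
          · exact pvRel_modify_ne (by decide) rHp
          · exact pvRel_modify_ne (by decide) rIn
        · rw [if_neg hb]
          by_cases hne : n = b
          · rw [if_neg (by simpa using hne)]
            refine hinv _ ⟨hnd', hsub', a, b, c, d, rfl, ?_, ?_, ?_, ?_⟩
            · exact pvRel_modify_ne (by decide) rCl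
            · unfold pvRel; rw [if_neg hb]; exact hkeep b rSt.2 hne
            · exact pvRel_modify_ne (by decide) rHp
            · exact pvRel_modify_ne (by decide) rIn
          · rw [if_pos hne]
            exact (hbad b rSt.1 rSt.2 hne).symm
      · -- pfx = "HPC"
        rw [pvA_inner_HPC]
        unfold pvRel at rHp
        split_ifs at rHp with hcc
        · rw [if_pos hcc]
          refine hinv _ ⟨hnd', hsub', a, b, n, d, rfl, ?_, ?_, ?_, ?_⟩
          · exact pvRel_modify_ne (by decide) rCl
          · exact pvRel_modify_ne (by decide) rSt
          · unfold pvRel; rw [if_neg (pvN_ne_zero value)]; exact hfresh rHp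
          · exact pvRel_modify_ne (by decide) rIn
        · rw [if_neg hcc]
          by_cases hne : n = c
          · rw [if_neg (by simpa using hne)]
            refine hinv _ ⟨hnd', hsub', a, b, c, d, rfl, ?_, ?_, ?_, ?_⟩
            · exact pvRel_modify_ne (by decide) rCl
            · exact pvRel_modify_ne (by decide) rSt
            · unfold pvRel; rw [if_neg hcc]; exact hkeep c rHp.2 hne
            · exact pvRel_modify_ne (by decide) rIn
          · rw [if_pos hne]
            exact (hbad c rHp.1 rHp.2 hne).symm
      · -- pfx = "INTEGRATION"
        rw [pvA_inner_INTEGRATION]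
        unfold pvRel at rIn
        split_ifs at rIn with hd
        · rw [if_pos hd]
          refine hinv _ ⟨hnd', hsub', a, b, c, n, rfl, ?_, ?_, ?_, ?_⟩
          · exact pvRel_modify_ne (by decide) rCl
          · exact pvRel_modify_ne (by decide) rSt
          · exact pvRel_modify_ne (by decide) rHp
          · unfold pvRel; rw [if_neg (pvN_ne_zero value)]; exact hfresh rIn
        · rw [if_neg hd]
          by_cases hne : n = d
          · rw [if_neg (by simpa using hne)]
            refine hinv _ ⟨hnd', hsub', a, b, c, d, rfl, ?_, ?_, ?_, ?_⟩
            · exact pvRel_modify_ne (by decide) rCl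
            · exact pvRel_modify_ne (by decide) rSt
            · exact pvRel_modify_ne (by decide) rHp
            · unfold pvRel; rw [if_neg hd]; exact hkeep d rIn.2 hne
          · rw [if_pos hne]
            exact (hbad d rIn.1 rIn.2 hne).symm
    · rw [if_neg hmem]
      rw [Bool.not_eq_true] at hmem
      simp only [pvA_loop, hmem, Bool.not_false, if_true]

-- ===== VERDICT (by name: the statement is the Claim_ definition above) =====
theorem check_secrets_spec : Claim_equal_check_secrets := by
  intro secrets _
  unfold Spec_check_secrets
  have h := pvMain secrets [0, 0, 0, 0] PySem.Dict.empty ?_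
  · simpa [check_secrets, check_secrets_alt, pvB_run] using h
  · refine ⟨by simp, by simp, 0, 0, 0, 0, rfl, ?_, ?_, ?_, ?_⟩ <;> simp [pvRel]
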